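-- pv_equiv track=rewrite | github.com/hksoftcorn/Algorithm | 프로그래머스/01_해시/전화번호 목록.py | solution
-- ===== SOURCE A (Python) =====
-- def solution(phone_book):
--     answer = True
--     N = len(phone_book)
--
--     for i in range(N):
--         number = phone_book[i]
--         length = len(number)
--         for j in range(N):
--             if i == j: continue
--             compare_number = phone_book[j]
--             if length > len(compare_number): continue
--             if number == compare_number[:length]:
--                 answer = False
--                 return answer
--     return answer
-- ===== SOURCE B (Python) =====
-- def solution(phone_book):
--     numbers = set(phone_book)
--     if len(numbers) != len(phone_book):
--         return False
--     for number in phone_book: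
--         for k in range(len(number)):
--             if number[:k] in numbers:
--                 return False
--     return True
-- ===== Notes on version B (the rewrite author's own statement) =====
-- stated objective: alternative
-- what changed: Replaces the all-pairs O(N^2) index-vs-index prefix comparison with a hash-set formulation: a duplicate check via the set's size plus, for each number, membership tests of its proper prefixes in the set.
import Mathlib
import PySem

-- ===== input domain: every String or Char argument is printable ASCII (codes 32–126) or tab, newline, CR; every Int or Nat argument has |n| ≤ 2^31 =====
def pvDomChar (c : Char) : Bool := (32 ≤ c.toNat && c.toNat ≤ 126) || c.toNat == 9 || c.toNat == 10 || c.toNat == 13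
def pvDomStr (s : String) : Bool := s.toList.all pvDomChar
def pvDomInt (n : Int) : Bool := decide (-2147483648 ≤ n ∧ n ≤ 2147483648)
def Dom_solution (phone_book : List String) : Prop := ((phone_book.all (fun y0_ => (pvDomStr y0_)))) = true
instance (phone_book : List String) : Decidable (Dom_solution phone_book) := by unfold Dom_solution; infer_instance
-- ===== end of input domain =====

-- B replaces A's all-pairs prefix scan with a set of the numbers: a duplicate check
-- via the set's size plus, for each number, membership tests of its proper prefixes.

-- ===== PORT A =====
-- inner 'for j in range(N)' loop; returns true iff the loop hit 'return False'
def solA_inner (pb : List String) (i : Int) (number : String) : List Int → Bool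
  | [] => false
  | j :: rest =>
    if i = j then solA_inner pb i number rest
    else
      match PySem.List.pyGet? pb j with
      | none => false  -- IndexError (unreachable: j ∈ range(N))
      | some cmp =>
        if PySem.Str.len number > PySem.Str.len cmp then solA_inner pb i number rest
        else if number = PySem.Str.slice cmp none (some (PySem.Str.len number)) then true
        else solA_inner pb i number rest

-- outer 'for i in range(N)' loop
def solA_outer (pb : List String) : List Int → Bool
  | [] => true
  | i :: rest =>
    match PySem.List.pyGet? pb i with
    | none => true  -- IndexError (unreachable: i ∈ range(N))
    | some number =>
      if solA_inner pb i number (PySem.List.pyRange 0 (pb.length : Int)) then false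
      else solA_outer pb rest

def solution (phone_book : List String) : Bool :=
  solA_outer phone_book (PySem.List.pyRange 0 (phone_book.length : Int))

-- ===== PORT B =====
-- inner 'for k in range(len(number))' loop: is some proper prefix of number in the set?
def solB_inner (numbers : PySem.Set String) (number : String) : List Int → Bool
  | [] => false
  | k :: rest =>
    if PySem.Set.contains numbers (PySem.Str.slice number none (some k)) then true
    else solB_inner numbers number rest

-- outer 'for number in phone_book' loop
def solB_outer (numbers : PySem.Set String) : List String → Bool
  | [] => true
  | number :: rest =>
    if solB_inner numbers number (PySem.List.pyRange 0 (PySem.Str.len number)) then false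
    else solB_outer numbers rest

def solution_alt (phone_book : List String) : Bool :=
  let numbers : PySem.Set String := PySem.Set.ofList phone_book
  if numbers.length ≠ phone_book.length then false
  else solB_outer numbers phone_book

-- ===== PRECONDITION & SPEC =====
def Spec_solution (phone_book : List String) (out : Bool) : Prop := out = solution_alt phone_book
instance (phone_book : List String) (out : Bool) : Decidable (Spec_solution phone_book out) := by unfold Spec_solution; infer_instance

-- ===== CLAIM (what is proved, stated in full; the proofs are below) =====
def Claim_equal_solution : Prop := ∀ (phone_book : List String), Dom_solution phone_book → Spec_solution phone_book (solution phone_book)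

-- ===== LEMMAS AND PROOFS =====

-- the common specification: some entry is a prefix of the entry at a different index
def HasPair (pb : List String) : Prop :=
  ∃ i j, ∃ (_ : i < pb.length) (_ : j < pb.length), i ≠ j ∧ pb[i].toList <+: pb[j].toList

-- Python's 'number == compare_number[:length]' is list prefix
theorem slice_eq_iff_prefix (number cmp : String) :
    (number = PySem.Str.slice cmp none (some (PySem.Str.len number))) ↔
      number.toList <+: cmp.toList := by
  rw [← String.toList_inj, PySem.Str.toList_slice, PySem.Chars.slice_eq_listSlice,
    PySem.Str.len_eq, PySem.List.slice_to_natCast]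
  exact List.prefix_iff_eq_take.symm

theorem solA_inner_true_iff (pb : List String) (i : Int) (number : String) (js : List Int)
    (hjs : ∀ j ∈ js, 0 ≤ j ∧ j < (pb.length : Int)) :
    solA_inner pb i number js = true ↔
      ∃ j ∈ js, j ≠ i ∧ ∃ (_ : j.toNat < pb.length), number.toList <+: pb[j.toNat].toList := by
  induction js with
  | nil => simp [solA_inner]
  | cons j rest ih =>
    have hj := hjs j (by simp)
    have hrest := fun x hx => hjs x (List.mem_cons_of_mem _ hx)
    have hjn : j.toNat < pb.length := by omega
    have hget : PySem.List.pyGet? pb j = some pb[j.toNat] := by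
      have h1 : PySem.List.pyGet? pb j = pb[j.toNat]? := by
        rw [show j = ((j.toNat : Nat) : Int) by omega]
        exact PySem.List.pyGet?_natCast ..
      rw [h1, List.getElem?_eq_getElem hjn]
    rw [List.exists_mem_cons_iff]
    by_cases hij : i = j
    · subst hij
      rw [show solA_inner pb i number (i :: rest) = solA_inner pb i number rest by
        simp [solA_inner]]
      rw [ih hrest]
      simp
    · rw [show solA_inner pb i number (j :: rest) =
        (if PySem.Str.len number > PySem.Str.len pb[j.toNat] then solA_inner pb i number rest
         else if number = PySem.Str.slice pb[j.toNat] none (some (PySem.Str.len number)) then true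
         else solA_inner pb i number rest) by simp [solA_inner, hij, hget]]
      have hne : j ≠ i := fun h => hij h.symm
      split_ifs with hlen heq
      · rw [ih hrest]
        have hnp : ¬ number.toList <+: pb[j.toNat].toList := by
          intro hp
          have h2 := hp.length_le
          rw [PySem.Str.len_eq, PySem.Str.len_eq] at hlen
          have : number.toList.length > pb[j.toNat].toList.length := by exact_mod_cast hlen
          omega
        simp [hne, hjn, hnp]
      · simp only [true_iff]
        exact Or.inl ⟨hne, hjn, (slice_eq_iff_prefix _ _).mp heq⟩
      · rw [ih hrest]
        have hnp : ¬ number.toList <+: pb[j.toNat].toList := fun hp =>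
          heq ((slice_eq_iff_prefix _ _).mpr hp)
        simp [hne, hjn, hnp]

theorem solA_outer_false_iff (pb : List String) (is : List Int)
    (his : ∀ i ∈ is, 0 ≤ i ∧ i < (pb.length : Int)) :
    solA_outer pb is = false ↔
      ∃ i ∈ is, ∃ (_ : i.toNat < pb.length),
        solA_inner pb i (pb[i.toNat]) (PySem.List.pyRange 0 (pb.length : Int)) = true := by
  induction is with
  | nil => simp [solA_outer]
  | cons i rest ih =>
    have hi := his i (by simp)
    have hrest := fun x hx => his x (List.mem_cons_of_mem _ hx)
    have hin : i.toNat < pb.length := by omega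
    have hget : PySem.List.pyGet? pb i = some pb[i.toNat] := by
      have h1 : PySem.List.pyGet? pb i = pb[i.toNat]? := by
        rw [show i = ((i.toNat : Nat) : Int) by omega]
        exact PySem.List.pyGet?_natCast ..
      rw [h1, List.getElem?_eq_getElem hin]
    rw [List.exists_mem_cons_iff,
      show solA_outer pb (i :: rest) =
        (if solA_inner pb i (pb[i.toNat]) (PySem.List.pyRange 0 (pb.length : Int)) then false
         else solA_outer pb rest) by simp [solA_outer, hget]]
    split_ifs with hfound
    · simp [hin, hfound]
    · rw [ih hrest]
      simp [hin, hfound]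

theorem solution_false_iff (pb : List String) : solution pb = false ↔ HasPair pb := by
  have hr : ∀ x ∈ PySem.List.pyRange 0 (pb.length : Int), 0 ≤ x ∧ x < (pb.length : Int) :=
    fun x hx => PySem.List.mem_pyRange_one.mp hx
  rw [solution, solA_outer_false_iff pb _ hr]
  constructor
  · rintro ⟨i, hi, hin, htrue⟩
    rw [solA_inner_true_iff pb i _ _ hr] at htrue
    obtain ⟨j, hjmem, hji, hjn, hpre⟩ := htrue
    have hib := PySem.List.mem_pyRange_one.mp hi
    have hjb := PySem.List.mem_pyRange_one.mp hjmem
    exact ⟨i.toNat, j.toNat, hin, hjn, by omega, hpre⟩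
  · rintro ⟨i, j, hi, hj, hij, hpre⟩
    refine ⟨(i : Int), PySem.List.mem_pyRange_one.mpr ⟨by omega, by exact_mod_cast hi⟩,
      by simpa using hi, ?_⟩
    rw [solA_inner_true_iff pb _ _ _ hr]
    refine ⟨(j : Int), PySem.List.mem_pyRange_one.mpr ⟨by omega, by exact_mod_cast hj⟩,
      by omega, by simpa using hj, by simpa using hpre⟩

theorem solB_inner_true_iff (numbers : PySem.Set String) (number : String) (ks : List Int) :
    solB_inner numbers number ks = true ↔
      ∃ k ∈ ks, PySem.Set.contains numbers (PySem.Str.slice number none (some k)) = true := by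
  induction ks with
  | nil => simp [solB_inner]
  | cons k rest ih =>
    rw [List.exists_mem_cons_iff, ← ih]
    show (if PySem.Set.contains numbers (PySem.Str.slice number none (some k)) = true then true
      else solB_inner numbers number rest) = true ↔ _
    rcases hb : PySem.Set.contains numbers (PySem.Str.slice number none (some k)) <;> simp


theorem solB_outer_false_iff (numbers : PySem.Set String) (l : List String) :
    solB_outer numbers l = false ↔
      ∃ number ∈ l, solB_inner numbers number (PySem.List.pyRange 0 (PySem.Str.len number)) = true := by
  induction l with
  | nil => simp [solB_outer]
  | cons x rest ih =>
    rw [List.exists_mem_cons_iff, ← ih]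
    show (if solB_inner numbers x (PySem.List.pyRange 0 (PySem.Str.len x)) = true then false
      else solB_outer numbers rest) = false ↔ _
    rcases hb : solB_inner numbers x (PySem.List.pyRange 0 (PySem.Str.len x)) <;> simp

-- 'len(set(phone_book)) == len(phone_book)' says phone_book has no duplicates
theorem length_ofList_eq_iff (pb : List String) :
    (PySem.Set.ofList pb).length = pb.length ↔ pb.Nodup := by
  constructor
  · intro h
    induction pb with
    | nil => exact List.nodup_nil
    | cons x xs ih =>
      rw [PySem.Set.ofList_cons] at h
      simp only [List.length_cons] at h
      have h1 : ((PySem.Set.ofList xs).discard x).length ≤ (PySem.Set.ofList xs).length :=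
        List.length_filter_le _ _
      have h2 : (PySem.Set.ofList xs).length ≤ xs.length := PySem.Set.length_ofList_le xs
      have hnd := ih (by omega)
      have h3 : ((PySem.Set.ofList xs).discard x).length = (PySem.Set.ofList xs).length := by
        omega
      have hall : ∀ a ∈ PySem.Set.ofList xs, (!a == x) = true :=
        List.length_filter_eq_length_iff.mp h3
      refine List.Nodup.cons (fun hx => ?_) hnd
      have := hall x ((PySem.Set.mem_ofList xs x).mpr hx)
      simp at this
  · intro h
    rw [PySem.Set.ofList_eq_self_of_nodup pb h]

theorem contains_ofList_iff (pb : List String) (s : String) :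
    PySem.Set.contains (PySem.Set.ofList pb) s = true ↔ s ∈ pb := by
  simp [PySem.Set.contains, PySem.Set.mem_ofList]

-- HasPair, phrased the way B looks for it
theorem hasPair_iff_B (pb : List String) :
    HasPair pb ↔ ¬ pb.Nodup ∨
      ∃ y ∈ pb, ∃ k : Int, 0 ≤ k ∧ k < PySem.Str.len y ∧ (PySem.Str.slice y none (some k)) ∈ pb := by
  constructor
  · rintro ⟨i, j, hi, hj, hij, hpre⟩
    by_cases heq : pb[i] = pb[j]
    · exact Or.inl (fun hnd => hij (hnd.getElem_inj_iff.mp heq))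
    · right
      refine ⟨pb[j], List.getElem_mem hj, (pb[i].toList.length : Int), by omega, ?_, ?_⟩
      · rw [PySem.Str.len_eq]
        have hle := hpre.length_le
        have hlt : pb[i].toList.length < pb[j].toList.length := by
          rcases lt_or_eq_of_le hle with h | h
          · exact h
          · exact absurd (String.toList_inj.mp (hpre.eq_of_length h)) heq
        exact_mod_cast hlt
      · have : PySem.Str.slice pb[j] none (some (pb[i].toList.length : Int)) = pb[i] := by
          apply String.toList_inj.mp
          rw [PySem.Str.toList_slice, PySem.Chars.slice_eq_listSlice, PySem.List.slice_to_natCast]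
          exact (List.prefix_iff_eq_take.mp hpre).symm
        rw [this]
        exact List.getElem_mem hi
  · rintro (hnd | ⟨y, hy, k, hk0, hklt, hmem⟩)
    · rw [List.nodup_iff_getElem?_ne_getElem?] at hnd
      push Not at hnd
      obtain ⟨i, j, hij, hj, he⟩ := hnd
      have hi : i < pb.length := by omega
      rw [List.getElem?_eq_getElem hi, List.getElem?_eq_getElem hj] at he
      have he' : pb[i] = pb[j] := by simpa using he
      exact ⟨i, j, hi, hj, by omega, by rw [he']⟩
    · obtain ⟨j, hj, hyj⟩ := List.mem_iff_getElem.mp hy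
      obtain ⟨i, hi, hsi⟩ := List.mem_iff_getElem.mp hmem
      have hky : k.toNat < y.toList.length := by
        rw [PySem.Str.len_eq] at hklt; omega
      have hslist : (PySem.Str.slice y none (some k)).toList = y.toList.take k.toNat := by
        rw [PySem.Str.toList_slice, PySem.Chars.slice_eq_listSlice,
          PySem.List.slice_to y.toList hk0]
      refine ⟨i, j, hi, hj, ?_, ?_⟩
      · intro h
        subst h
        rw [hyj] at hsi
        have hlen := congrArg (fun s : String => s.toList.length) hsi
        simp only [] at hlen
        rw [hslist, List.length_take] at hlen
        omega
      · rw [hsi, hyj, hslist]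
        rw [List.prefix_iff_eq_take, List.length_take]
        congr 1
        omega

theorem solution_alt_false_iff (pb : List String) : solution_alt pb = false ↔ HasPair pb := by
  rw [hasPair_iff_B]
  show (if (PySem.Set.ofList pb).length ≠ pb.length then false
    else solB_outer (PySem.Set.ofList pb) pb) = false ↔ _
  by_cases hdup : (PySem.Set.ofList pb).length = pb.length
  · rw [if_neg (by simpa using hdup)]
    rw [solB_outer_false_iff]
    have hnd : pb.Nodup := (length_ofList_eq_iff pb).mp hdup
    simp only [hnd, not_true, false_or]
    apply exists_congr; intro y
    apply and_congr_right; intro hy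
    constructor
    · intro htrue
      rw [solB_inner_true_iff] at htrue
      obtain ⟨k, hk, hc⟩ := htrue
      have hb := PySem.List.mem_pyRange_one.mp hk
      exact ⟨k, hb.1, hb.2, (contains_ofList_iff pb _).mp hc⟩
    · rintro ⟨k, h0, hlt, hmem⟩
      rw [solB_inner_true_iff]
      exact ⟨k, PySem.List.mem_pyRange_one.mpr ⟨h0, hlt⟩, (contains_ofList_iff pb _).mpr hmem⟩
  · rw [if_pos (by simpa using hdup)]
    refine iff_of_true rfl (Or.inl fun hnd => hdup ((length_ofList_eq_iff pb).mpr hnd))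

-- ===== VERDICT (by name: the statement is the Claim_ definition above) =====
theorem solution_spec : Claim_equal_solution := by
  intro pb _
  unfold Spec_solution
  have h1 := solution_false_iff pb
  have h2 := solution_alt_false_iff pb
  cases hA : solution pb <;> cases hB : solution_alt pb <;> simp_all
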